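-- pv_equiv track=rewrite | github.com/AitorMalo/Spark-Notebooks | New_MX_Names.py | ordenar_por_palabras_clave
-- ===== SOURCE A (Python) =====
-- def ordenar_por_palabras_clave(lista, palabras_clave):
--     resultado = []
--     palabras_no_encontradas = []
--     for palabra in palabras_clave:
--         for elemento in lista:
--             if palabra in elemento:
--                 resultado.append(elemento)
--     for elemento in lista:
--         if not any(palabra in elemento for palabra in palabras_clave):
--             palabras_no_encontradas.append(elemento)
--     resultado.extend(palabras_no_encontradas)
--     lista_sin_duplicados = []
--     for palabra in resultado:
--         if palabra not in lista_sin_duplicados: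
--             lista_sin_duplicados.append(palabra)
--     return lista_sin_duplicados
-- ===== SOURCE B (Python) =====
-- def ordenar_por_palabras_clave(lista, palabras_clave):
--     # Dedup once up front (first occurrences), then one stable sort by the
--     # index of the first matching keyword (unmatched elements sort last).
--     unicos = list(dict.fromkeys(lista))
--
--     def clave(elemento):
--         i = 0
--         for palabra in palabras_clave:
--             if palabra in elemento:
--                 return i
--             i += 1
--         return i
--
--     return sorted(unicos, key=clave)
-- ===== Notes on version B (the rewrite author's own statement) =====
-- stated objective: faster
-- what changed: Instead of appending every match per keyword and deduplicating the whole concatenation with a quadratic membership scan at the end, B dedups the list once up front (dict.fromkeys) and does a single stable sort keyed by the index of the first matching keyword (unmatched elements get key len(palabras_clave) and so sort last in list order).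
import Mathlib
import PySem

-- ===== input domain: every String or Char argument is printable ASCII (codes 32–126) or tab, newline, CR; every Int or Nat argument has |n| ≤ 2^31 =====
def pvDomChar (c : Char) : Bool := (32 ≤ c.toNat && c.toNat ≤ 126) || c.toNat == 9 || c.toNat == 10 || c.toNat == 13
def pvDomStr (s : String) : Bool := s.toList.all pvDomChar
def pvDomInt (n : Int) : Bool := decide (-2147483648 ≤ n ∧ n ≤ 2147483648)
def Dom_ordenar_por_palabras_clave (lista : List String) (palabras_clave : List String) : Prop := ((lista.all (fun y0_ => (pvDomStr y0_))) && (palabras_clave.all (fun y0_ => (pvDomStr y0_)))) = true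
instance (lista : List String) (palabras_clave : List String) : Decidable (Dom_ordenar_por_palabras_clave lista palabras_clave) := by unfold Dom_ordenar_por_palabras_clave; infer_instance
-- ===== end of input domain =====

-- B dedups the list once up front and then does ONE stable sort keyed by the index of the
-- first matching keyword (unmatched elements sort last), instead of A's per-keyword append
-- passes followed by a membership-scan dedup at the end; same return value on every input.

-- ===== PORT A =====
def ordenar_por_palabras_clave (lista : List String) (palabras_clave : List String) : List String :=
  let resultado := palabras_clave.foldl (fun acc palabra =>
      lista.foldl (fun acc2 elemento =>
        if PySem.Str.isIn palabra elemento then acc2 ++ [elemento] else acc2) acc) []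
  let palabras_no_encontradas := lista.foldl (fun acc elemento =>
      if !(palabras_clave.any (fun palabra => PySem.Str.isIn palabra elemento)) then
        acc ++ [elemento] else acc) []
  let resultado2 := resultado ++ palabras_no_encontradas
  resultado2.foldl (fun acc palabra =>
      if !(acc.contains palabra) then acc ++ [palabra] else acc) []

-- ===== PORT B =====
-- Source B's `clave`: index of the first keyword contained in `elemento`, else len(palabras_clave)
def claveIdx (palabras_clave : List String) (elemento : String) : Nat :=
  match palabras_clave with
  | [] => 0
  | palabra :: resto => if PySem.Str.isIn palabra elemento then 0 else claveIdx resto elemento + 1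

def ordenar_por_palabras_clave_alt (lista : List String) (palabras_clave : List String) : List String :=
  PySem.List.sorted (PySem.List.dedup lista) (fun e => claveIdx palabras_clave e) false

-- ===== PRECONDITION & SPEC =====
def Spec_ordenar_por_palabras_clave (lista : List String) (palabras_clave : List String) (out : List String) : Prop := out = ordenar_por_palabras_clave_alt lista palabras_clave
instance (lista : List String) (palabras_clave : List String) (out : List String) : Decidable (Spec_ordenar_por_palabras_clave lista palabras_clave out) := by unfold Spec_ordenar_por_palabras_clave; infer_instance

-- ===== CLAIM (what is proved, stated in full; the proofs are below) =====
def Claim_equal_ordenar_por_palabras_clave : Prop := ∀ (lista : List String) (palabras_clave : List String), Dom_ordenar_por_palabras_clave lista palabras_clave → Spec_ordenar_por_palabras_clave lista palabras_clave (ordenar_por_palabras_clave lista palabras_clave)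

-- ===== LEMMAS AND PROOFS =====

-- first-occurrence dedup in a structurally recursive form (proof-side mirror of the two
-- dedup computations: A's final membership loop and B's dict.fromkeys)
def ded {α : Type} [BEq α] : List α → List α
  | [] => []
  | x :: xs => x :: ded (xs.filter (fun y => !(y == x)))
termination_by xs => xs.length
decreasing_by simpa using Nat.lt_succ_of_le (le_trans (List.length_filter_le _ xs.attach) (by simp))

theorem ded_cons {α : Type} [BEq α] (x : α) (xs : List α) :
    ded (x :: xs) = x :: ded (xs.filter (fun y => !(y == x))) := by
  rw [ded]

theorem foldl_dedup_step {α : Type} [BEq α] [LawfulBEq α] (ys : List α) (init : List α) :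
    ys.foldl (fun acc x => if !(acc.contains x) then acc ++ [x] else acc) init
      = init ++ ded (ys.filter (fun y => !(init.contains y))) := by
  induction ys generalizing init with
  | nil => simp [ded]
  | cons y ys ih =>
    by_cases hy : init.contains y
    · rw [List.foldl_cons, if_neg (by simp_all), ih]
      congr 2
      rw [List.filter_cons_of_neg (by simp_all)]
    · rw [List.foldl_cons, if_pos (by simp_all), ih,
        List.filter_cons_of_pos (by simp_all), ded_cons, List.filter_filter,
        List.append_assoc, List.singleton_append]
      congr 2
      exact congrArg ded (List.filter_congr (by
        intro z hz
        by_cases h1 : z ∈ init <;> by_cases h2 : z = y <;> simp [h1, h2]))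

theorem ded_eq_foldl {α : Type} [BEq α] [LawfulBEq α] (xs : List α) :
    ded xs = xs.foldl (fun acc x => if !(acc.contains x) then acc ++ [x] else acc) [] := by
  rw [foldl_dedup_step]; simp

theorem ded_eq_dedup {α : Type} [BEq α] [LawfulBEq α] (xs : List α) :
    PySem.List.dedup xs = ded xs := by
  have hfun : (PySem.Set.add : PySem.Set α → α → PySem.Set α)
      = (fun acc x => if !(acc.contains x) then acc ++ [x] else acc) := by
    funext s x
    by_cases h : s.contains x <;> simp [PySem.Set.add]
  rw [ded_eq_foldl]
  simp [PySem.List.dedup, PySem.Set.ofList, PySem.Set.empty, hfun]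

theorem mem_ded {α : Type} [BEq α] [LawfulBEq α] (xs : List α) (x : α) :
    x ∈ ded xs ↔ x ∈ xs := by
  rw [← ded_eq_dedup]; exact PySem.List.mem_dedup xs x

theorem ded_append {α : Type} [BEq α] [LawfulBEq α] (xs ys : List α) :
    ded (xs ++ ys) = ded xs ++ ded (ys.filter (fun y => !(xs.contains y))) := by
  rw [ded_eq_foldl, List.foldl_append, ← ded_eq_foldl, foldl_dedup_step]
  congr 2
  apply List.filter_congr
  intro z _
  by_cases h : z ∈ xs <;> simp [h, mem_ded]

theorem ded_filter {α : Type} [BEq α] [LawfulBEq α] (xs : List α) :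
    ∀ p : α → Bool, ded (xs.filter p) = (ded xs).filter p := by
  induction xs using ded.induct with
  | case1 => simp [ded]
  | case2 x xs ih =>
    have ih' : ∀ p : α → Bool, ded (List.filter p (List.filter (fun y => !(y == x)) xs))
        = List.filter p (ded (List.filter (fun y => !(y == x)) xs)) := by
      have := List.unattach_filter (l := xs.attach) (f := fun (y : {y // y ∈ xs}) => !((y : α) == x))
        (g := fun y => !(y == x)) (hf := fun a h => rfl)
      simp only [List.unattach_attach] at this
      rw [← this]
      exact ih
    intro p
    by_cases hp : p x
    · rw [List.filter_cons_of_pos hp, ded_cons, ded_cons, List.filter_cons_of_pos hp]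
      rw [List.filter_comm, ih' p]
    · rw [List.filter_cons_of_neg hp, ded_cons, List.filter_cons_of_neg hp]
      rw [← ih' p, List.filter_comm]
      congr 1
      symm
      apply List.filter_eq_self.mpr
      intro a ha
      have hpa := List.of_mem_filter ha
      have : ¬ a = x := fun h => hp (h ▸ hpa)
      simp [this]

theorem insertBy_between {α : Type} (before : α → α → Bool) (x : α) (P Q : List α)
    (hP : ∀ y ∈ P, before x y = false) (hQ : ∀ z ∈ Q, before x z = true) :
    PySem.List.insertBy before x (P ++ Q) = P ++ x :: Q := by
  induction P with
  | nil =>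
    cases Q with
    | nil => simp [PySem.List.insertBy]
    | cons z Q => simp [PySem.List.insertBy, hQ z (by simp)]
  | cons y P ih =>
    have h1 : before x y = false := hP y (by simp)
    simp only [List.cons_append, PySem.List.insertBy, h1, Bool.false_eq_true, if_false]
    exact congrArg (y :: ·) (ih (fun y hy => hP y (by simp [hy])))

-- Python's stable sort with a bounded Nat key is the concatenation of the key's buckets
theorem sorted_buckets {α : Type} (key : α → Nat) (m : Nat) (xs : List α)
    (h : ∀ x ∈ xs, key x ≤ m) :
    PySem.List.sorted xs key false
      = (List.range (m + 1)).flatMap (fun k => xs.filter (fun x => key x == k)) := by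
  rw [PySem.List.sorted_eq_foldl_insertBy]
  induction xs using List.reverseRecOn with
  | nil => simp
  | append_singleton xs x ih =>
    rw [List.foldl_append, List.foldl_cons, List.foldl_nil,
      ih (fun y hy => h y (by simp [hy]))]
    have hk0 : key x ≤ m := h x (by simp)
    have hsplit : m + 1 = (key x + 1) + (m - key x) := by omega
    rw [hsplit, List.range_add, List.flatMap_append, List.flatMap_append]
    rw [insertBy_between]
    · -- P ++ x :: Q = buckets of (xs ++ [x])
      rw [List.range_succ, List.flatMap_append, List.flatMap_append]
      simp only [List.flatMap_singleton, List.filter_append]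
      have e1 : List.flatMap
            (fun k => List.filter (fun y => key y == k) xs ++ List.filter (fun y => key y == k) [x])
            (List.range (key x))
          = List.flatMap (fun k => List.filter (fun y => key y == k) xs) (List.range (key x)) := by
        apply List.flatMap_congr
        intro k hk
        have hlt : k < key x := List.mem_range.mp hk
        have hG : List.filter (fun y => key y == k) [x] = [] := by simp; omega
        rw [hG, List.append_nil]
      have e2 : List.flatMap
            (fun k => List.filter (fun y => key y == k) xs ++ List.filter (fun y => key y == k) [x])
            ((List.range (m - key x)).map (fun j => key x + 1 + j))
          = List.flatMap (fun k => List.filter (fun y => key y == k) xs)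
              ((List.range (m - key x)).map (fun j => key x + 1 + j)) := by
        apply List.flatMap_congr
        intro k hk
        obtain ⟨j, hj, rfl⟩ := List.mem_map.mp hk
        have hG : List.filter (fun y => key y == key x + 1 + j) [x] = [] := by simp; omega
        rw [hG, List.append_nil]
      have hx0 : List.filter (fun y => key y == key x) [x] = [x] := by simp
      conv_rhs => rw [e1, e2, hx0]
      simp
    · intro y hy
      obtain ⟨k, hk, hyk⟩ := List.mem_flatMap.mp hy
      have h1 : key y = k := by simpa using (List.of_mem_filter hyk)
      have h2 : k < key x + 1 := List.mem_range.mp hk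
      simp; omega
    · intro z hz
      obtain ⟨k, hk, hzk⟩ := List.mem_flatMap.mp hz
      obtain ⟨j, hj, rfl⟩ := List.mem_map.mp hk
      have h1 : key z = key x + 1 + j := by simpa using (List.of_mem_filter hzk)
      simp; omega

theorem claveIdx_le (ps : List String) (e : String) : claveIdx ps e ≤ ps.length := by
  induction ps with
  | nil => simp [claveIdx]
  | cons p qs ih => simp only [claveIdx, List.length_cons]; split <;> omega

-- dedup of A's keyword passes followed by its unmatched pass IS the bucket concatenation
theorem main_buckets (ps xs : List String) :
    ded ((ps.flatMap fun p => xs.filter (fun e => PySem.Str.isIn p e))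
          ++ xs.filter (fun e => !(ps.any (fun p => PySem.Str.isIn p e))))
      = (List.range (ps.length + 1)).flatMap
          (fun k => (ded xs).filter (fun e => claveIdx ps e == k)) := by
  induction ps generalizing xs with
  | nil => simp [claveIdx]
  | cons p qs ih =>
    rw [List.flatMap_cons, List.append_assoc, ded_append, List.filter_append]
    -- the contains-filter reduces to "does not contain keyword p" on elements of xs
    have hC : ∀ a ∈ xs, ((xs.filter (fun e => PySem.Str.isIn p e)).contains a) = PySem.Str.isIn p a := by
      intro a ha
      by_cases hm : PySem.Str.isIn p a <;> simp [List.mem_filter, ha]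
    have e1 : (qs.flatMap (fun q => xs.filter (fun e => PySem.Str.isIn q e))).filter
          (fun y => !((xs.filter (fun e => PySem.Str.isIn p e)).contains y))
        = qs.flatMap (fun q =>
            (xs.filter (fun e => !(PySem.Str.isIn p e))).filter (fun e => PySem.Str.isIn q e)) := by
      rw [List.filter_flatMap]
      apply List.flatMap_congr
      intro q _
      rw [List.filter_filter, List.filter_filter]
      apply List.filter_congr
      intro a ha
      rw [hC a ha]
      exact Bool.and_comm _ _
    have e2 : (xs.filter (fun e => !((p :: qs).any (fun q => PySem.Str.isIn q e)))).filter
          (fun y => !((xs.filter (fun e => PySem.Str.isIn p e)).contains y))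
        = (xs.filter (fun e => !(PySem.Str.isIn p e))).filter
            (fun e => !(qs.any (fun q => PySem.Str.isIn q e))) := by
      rw [List.filter_filter, List.filter_filter]
      apply List.filter_congr
      intro a ha
      rw [hC a ha]
      cases hp : PySem.Chars.isIn p.toList a.toList <;> simp [hp]
    rw [e1, e2, ih]
    -- right-hand side: peel off bucket 0 (the first keyword's matches)
    simp only [List.length_cons]
    conv_rhs => rw [List.range_succ_eq_map, List.flatMap_cons]
    have b0 : (ded xs).filter (fun e => claveIdx (p :: qs) e == 0)
        = ded (xs.filter (fun e => PySem.Str.isIn p e)) := by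
      rw [ded_filter]
      apply List.filter_congr
      intro a _
      cases hp : PySem.Chars.isIn p.toList a.toList <;> simp [claveIdx, hp]
    have bs : ((List.range (qs.length + 1)).map Nat.succ).flatMap
          (fun k => (ded xs).filter (fun e => claveIdx (p :: qs) e == k))
        = (List.range (qs.length + 1)).flatMap
            (fun k => (ded (xs.filter (fun e => !(PySem.Str.isIn p e)))).filter
              (fun e => claveIdx qs e == k)) := by
      rw [List.flatMap_map]
      apply List.flatMap_congr
      intro k _
      rw [ded_filter, List.filter_filter]
      apply List.filter_congr
      intro a _
      cases hp : PySem.Chars.isIn p.toList a.toList <;> simp [claveIdx, hp]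
    rw [b0, bs]

-- ===== VERDICT (by name: the statement is the Claim_ definition above) =====
theorem ordenar_por_palabras_clave_spec : Claim_equal_ordenar_por_palabras_clave := by
  intro lista palabras_clave _
  unfold Spec_ordenar_por_palabras_clave ordenar_por_palabras_clave ordenar_por_palabras_clave_alt
  have hinner : ∀ (p : String) (acc : List String),
      lista.foldl (fun acc2 e => if PySem.Str.isIn p e then acc2 ++ [e] else acc2) acc
        = acc ++ lista.filter (fun e => PySem.Str.isIn p e) := by
    intro p acc
    have := PySem.List.foldl_append_if (fun e => PySem.Str.isIn p e) (fun e => e) lista acc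
    simpa using this
  simp only [hinner]
  rw [PySem.List.foldl_append_eq_flatMap]
  have hun := PySem.List.foldl_append_if
      (fun e => !(palabras_clave.any (fun p => PySem.Str.isIn p e)))
      (fun e => e) lista ([] : List String)
  simp only [List.map_id', List.nil_append] at hun
  rw [hun, List.nil_append, foldl_dedup_step, List.nil_append]
  have hfil : (((palabras_clave.flatMap fun p => lista.filter (fun e => PySem.Str.isIn p e))
        ++ lista.filter (fun e => !(palabras_clave.any (fun p => PySem.Str.isIn p e)))).filter
          (fun y => !(([] : List String).contains y)))
      = ((palabras_clave.flatMap fun p => lista.filter (fun e => PySem.Str.isIn p e))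
        ++ lista.filter (fun e => !(palabras_clave.any (fun p => PySem.Str.isIn p e)))) := by
    simp
  rw [hfil, main_buckets,
    sorted_buckets (fun e => claveIdx palabras_clave e) palabras_clave.length
      (PySem.List.dedup lista) (fun e _ => claveIdx_le palabras_clave e), ded_eq_dedup]
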